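-- pv_equiv track=rewrite | github.com/happylittlebunny/Yelp-User-Pattern-And-Recommender-System | data_preprocess_code/compute.py | add_new_categories
-- ===== SOURCE A (Python) =====
-- new_cats = [
--    'Restaurants',
--    'Food',
--    'Nightlife',
--    'Shopping',
--    'Beauty & Spas',
--    'Event Planning & Services',
--    'Arts & Entertainment',
--    'Active Life',
--    'Hotels & Travel',
--    'Health & Medical',
--    'Local Services',
--    'Pets',
--    'Automotive',
--    'Home Services',
--    'Professional Services',
--    'Public Services & Government',
--    'Education',
--    'Financial Services',
--    'Local Flavor'
--    ]
--
-- def add_new_categories(categories):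
--     cate = categories[1:-1]
--     cate_list = cate.split(',')
--     for nc in new_cats:
--         nnc = '"'+nc+'"'
--         if nnc in cate_list:
--             return nc
--     return 'Others'
-- ===== SOURCE B (Python) =====
-- new_cats = [
--    'Restaurants',
--    'Food',
--    'Nightlife',
--    'Shopping',
--    'Beauty & Spas',
--    'Event Planning & Services',
--    'Arts & Entertainment',
--    'Active Life',
--    'Hotels & Travel',
--    'Health & Medical',
--    'Local Services',
--    'Pets',
--    'Automotive',
--    'Home Services',
--    'Professional Services',
--    'Public Services & Government',
--    'Education',
--    'Financial Services',
--    'Local Flavor'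
--    ]
--
-- _idx = {'"' + nc + '"': i for i, nc in enumerate(new_cats)}
--
-- def add_new_categories(categories):
--     n = len(new_cats)
--     best = n
--     for tok in categories[1:-1].split(','):
--         j = _idx.get(tok, n)
--         if j < best:
--             best = j
--     return new_cats[best] if best < n else 'Others'
-- ===== Notes on version B (the rewrite author's own statement) =====
-- stated objective: alternative
-- what changed: Instead of scanning the 19 priority categories in order with early return and an inner list-membership test per category, B precomputes a dict from quoted category string to its priority index and makes one pass over the input tokens, tracking the minimum index found.
import Mathlib
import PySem

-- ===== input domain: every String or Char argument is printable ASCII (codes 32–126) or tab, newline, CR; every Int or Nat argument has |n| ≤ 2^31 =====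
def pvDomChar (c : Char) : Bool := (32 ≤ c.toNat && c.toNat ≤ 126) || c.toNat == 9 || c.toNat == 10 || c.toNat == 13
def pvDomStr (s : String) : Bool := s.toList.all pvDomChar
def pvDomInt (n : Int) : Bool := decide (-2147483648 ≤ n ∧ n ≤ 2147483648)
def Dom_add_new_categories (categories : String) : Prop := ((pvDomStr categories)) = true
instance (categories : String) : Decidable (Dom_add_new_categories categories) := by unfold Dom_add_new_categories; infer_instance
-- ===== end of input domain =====

-- B replaces A's ordered scan of the 19 priority categories (with an inner membership
-- test per category) by a dict from quoted category to priority index and ONE pass over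
-- the input tokens tracking the minimum matched index (objective: alternative).

-- module-level constant shared by both Pythons
def new_cats : List String :=
  [ "Restaurants", "Food", "Nightlife", "Shopping", "Beauty & Spas",
    "Event Planning & Services", "Arts & Entertainment", "Active Life",
    "Hotels & Travel", "Health & Medical", "Local Services", "Pets",
    "Automotive", "Home Services", "Professional Services",
    "Public Services & Government", "Education", "Financial Services",
    "Local Flavor" ]

-- ===== PORT A =====
-- the 'for nc in new_cats: … return nc' loop with early return
def aLoop (cate_list : List String) : List String → String
  | [] => "Others"                                   -- falls through: return 'Others'
  | nc :: rest =>
      if ("\"" ++ nc ++ "\"") ∈ cate_list then nc    -- nnc = '"'+nc+'"'; if nnc in cate_list: return nc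
      else aLoop cate_list rest

def add_new_categories (categories : String) : String :=
  let cate := PySem.Str.slice categories (some 1) (some (-1))   -- categories[1:-1]
  let cate_list := (PySem.Str.split? cate ",").getD []          -- cate.split(','); sep ≠ "" so never none
  aLoop cate_list new_cats

-- ===== PORT B =====
-- _idx = {'"' + nc + '"': i for i, nc in enumerate(new_cats)}
def bIdx : PySem.Dict String Int :=
  PySem.Dict.ofList ((PySem.List.enumerate new_cats).map (fun p => ("\"" ++ p.2 ++ "\"", p.1)))

def add_new_categories_alt (categories : String) : String :=
  let n : Int := (new_cats.length : Int)
  let toks := (PySem.Str.split? (PySem.Str.slice categories (some 1) (some (-1))) ",").getD []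
  let best := toks.foldl (fun b tok =>
      let j := (PySem.Dict.get? bIdx tok).getD n      -- j = _idx.get(tok, n)
      if j < b then j else b) n
  if best < n then (PySem.List.pyGet? new_cats best).getD "Others"   -- new_cats[best]; guard makes the index valid, default unreachable
  else "Others"

-- ===== PRECONDITION & SPEC =====
def Spec_add_new_categories (categories : String) (out : String) : Prop := out = add_new_categories_alt categories
instance (categories : String) (out : String) : Decidable (Spec_add_new_categories categories out) := by unfold Spec_add_new_categories; infer_instance

-- ===== CLAIM (what is proved, stated in full; the proofs are below) =====
def Claim_equal_add_new_categories : Prop := ∀ (categories : String), Dom_add_new_categories categories → Spec_add_new_categories categories (add_new_categories categories)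

-- ===== LEMMAS AND PROOFS =====

-- the fold step of B
def bStep (b : Int) (tok : String) : Int :=
  let j := (PySem.Dict.get? bIdx tok).getD (new_cats.length : Int)
  if j < b then j else b

theorem bStep_eq (b : Int) (tok : String) :
    bStep b tok = min ((PySem.Dict.get? bIdx tok).getD (new_cats.length : Int)) b := by
  simp [bStep, min_def]; omega

-- running minimum facts
theorem fold_le_init (toks : List String) (b0 : Int) : toks.foldl bStep b0 ≤ b0 := by
  induction toks generalizing b0 with
  | nil => simp
  | cons t ts ih =>
      have := ih (bStep b0 t)
      have h2 : bStep b0 t ≤ b0 := by rw [bStep_eq]; exact min_le_right _ _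
      simpa [List.foldl] using le_trans this h2

theorem fold_le_mem (toks : List String) :
    ∀ (b0 : Int) (t : String), t ∈ toks →
      toks.foldl bStep b0 ≤ (PySem.Dict.get? bIdx t).getD (new_cats.length : Int) := by
  induction toks with
  | nil => intro _ _ ht; cases ht
  | cons u us ih =>
      intro b0 t ht
      rcases List.mem_cons.mp ht with rfl | h
      · exact le_trans (fold_le_init us _) (by rw [bStep_eq]; exact min_le_left _ _)
      · exact ih _ t h

theorem fold_cases (toks : List String) :
    ∀ (b0 : Int), toks.foldl bStep b0 = b0 ∨
      ∃ t ∈ toks, toks.foldl bStep b0 = (PySem.Dict.get? bIdx t).getD (new_cats.length : Int) := by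
  induction toks with
  | nil => intro _; left; rfl
  | cons u us ih =>
      intro b0
      rcases ih (bStep b0 u) with h | ⟨t, ht, h⟩
      · rcases min_cases ((PySem.Dict.get? bIdx u).getD (new_cats.length : Int)) b0 with ⟨he, _⟩ | ⟨he, _⟩
        · right
          exact ⟨u, List.mem_cons_self, by rw [List.foldl_cons, h, bStep_eq, he]⟩
        · left
          rw [List.foldl_cons, h, bStep_eq, he]
      · right; exact ⟨t, List.mem_cons_of_mem _ ht, by rw [List.foldl_cons, h]⟩

-- dict soundness: any hit names a real category and its index
theorem bIdx_sound (t : String) (j : Int) (h : PySem.Dict.get? bIdx t = some j) :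
    0 ≤ j ∧ j.toNat < 19 ∧
    new_cats[j.toNat]? = some (new_cats.getD j.toNat "") ∧
    PySem.List.pyGet? new_cats j = some (new_cats.getD j.toNat "") ∧
    t = "\"" ++ new_cats.getD j.toNat "" ++ "\"" := by
  have hm := PySem.Dict.mem_items_of_get?_eq_some bIdx h
  have hok : ∀ p ∈ bIdx.items, 0 ≤ p.2 ∧ p.2.toNat < 19 ∧
      new_cats[p.2.toNat]? = some (new_cats.getD p.2.toNat "") ∧
      PySem.List.pyGet? new_cats p.2 = some (new_cats.getD p.2.toNat "") ∧
      p.1 = "\"" ++ new_cats.getD p.2.toNat "" ++ "\"" := by decide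
  exact hok (t, j) hm

-- dict completeness: every category's quoted form is a key with its own index
theorem bIdx_complete : ∀ k : Nat, k < 19 → ∀ v, new_cats[k]? = some v →
    PySem.Dict.get? bIdx ("\"" ++ v ++ "\"") = some (k : Int) := by decide

theorem new_cats_length : new_cats.length = 19 := by decide

-- characterisation of A's loop: 'Others' with no match, or the FIRST match
theorem aLoop_spec (cats toks : List String) :
    (aLoop toks cats = "Others" ∧ ∀ nc ∈ cats, ("\"" ++ nc ++ "\"") ∉ toks) ∨
    (∃ (k : Nat) (v : String), cats[k]? = some v ∧ aLoop toks cats = v ∧ ("\"" ++ v ++ "\"") ∈ toks ∧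
       ∀ (k' : Nat) (v' : String), k' < k → cats[k']? = some v' → ("\"" ++ v' ++ "\"") ∉ toks) := by
  induction cats with
  | nil => left; exact ⟨rfl, by simp⟩
  | cons nc rest ih =>
      by_cases hmem : ("\"" ++ nc ++ "\"") ∈ toks
      · right
        exact ⟨0, nc, rfl, by simp [aLoop, hmem], hmem, by omega⟩
      · rcases ih with ⟨h1, h2⟩ | ⟨k, v, hget, heq, hin, hmin⟩
        · left
          refine ⟨by simp [aLoop, hmem, h1], ?_⟩
          intro x hx
          rcases List.mem_cons.mp hx with rfl | hx
          · exact hmem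
          · exact h2 x hx
        · right
          refine ⟨k + 1, v, by simpa using hget, by simp [aLoop, hmem, heq], hin, ?_⟩
          intro k' v' hk' hget'
          match k', hget' with
          | 0, hget' => obtain rfl := Option.some.inj hget'; exact hmem
          | k'' + 1, hget' => exact hmin k'' v' (by omega) (by simpa using hget')

-- core: A's loop equals B's fold-and-index, for ANY token list
theorem core (toks : List String) :
    aLoop toks new_cats =
      (if toks.foldl bStep (new_cats.length : Int) < (new_cats.length : Int)
       then (PySem.List.pyGet? new_cats (toks.foldl bStep (new_cats.length : Int))).getD "Others"
       else "Others") := by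
  set r := toks.foldl bStep (new_cats.length : Int) with hr
  rcases aLoop_spec new_cats toks with ⟨h1, h2⟩ | ⟨k, v, hget, heq, hin, hmin⟩
  · -- no category matches: every lookup misses, so r = length
    have hnone : ∀ t ∈ toks, PySem.Dict.get? bIdx t = none := by
      intro t ht
      cases hcase : PySem.Dict.get? bIdx t with
      | none => rfl
      | some j =>
          obtain ⟨_, _, hnc, _, rfl⟩ := bIdx_sound t j hcase
          exact absurd ht (h2 _ (List.mem_of_getElem? hnc))
    have hre : r = (new_cats.length : Int) := by
      rcases fold_cases toks (new_cats.length : Int) with h | ⟨t, ht, h⟩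
      · rw [← hr] at h; exact h
      · rw [← hr, hnone t ht] at h; simpa using h
    simp [hre, h1]
  · -- first match at index k: r = k
    have hk19 : k < 19 := by
      by_contra hk
      rw [List.getElem?_eq_none (by rw [new_cats_length]; omega)] at hget
      simp at hget
    have hkey := bIdx_complete k hk19 v hget
    have hle : r ≤ (k : Int) := by
      have := fold_le_mem toks (new_cats.length : Int) _ hin
      rw [← hr, hkey] at this
      simpa using this
    have hlt : r < (new_cats.length : Int) := by
      have hlen := new_cats_length; omega
    rcases fold_cases toks (new_cats.length : Int) with h | ⟨t, ht, h⟩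
    · rw [← hr] at h; omega
    · rw [← hr] at h
      cases hcase : PySem.Dict.get? bIdx t with
      | none => exfalso; rw [hcase] at h; simp at h; omega
      | some j =>
          rw [hcase] at h; simp at h
          obtain ⟨hj0, hjlt, hgetr, hpy, rfl⟩ := bIdx_sound t j hcase
          subst h
          have hkr : (k : Int) ≤ r := by
            by_contra hcon
            exact hmin r.toNat _ (by omega) hgetr ht
          have hrk : r = (k : Int) := le_antisymm hle hkr
          have hrn : r.toNat = k := by omega
          have hv : new_cats.getD r.toNat "" = v := by
            rw [hrn]; rw [hrn] at hgetr
            exact Option.some.inj (hgetr.symm.trans hget)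
          rw [heq, if_pos hlt, hpy, Option.getD_some, hv]

theorem ports_eq (categories : String) :
    add_new_categories categories = add_new_categories_alt categories := by
  simp only [add_new_categories, add_new_categories_alt]
  generalize (PySem.Str.split? (PySem.Str.slice categories (some 1) (some (-1))) ",").getD [] = toks
  rw [(rfl : (fun (b : Int) (tok : String) =>
      let j := (PySem.Dict.get? bIdx tok).getD (new_cats.length : Int)
      if j < b then j else b) = bStep)]
  exact core toks

-- ===== VERDICT (by name: the statement is the Claim_ definition above) =====
theorem add_new_categories_spec : Claim_equal_add_new_categories := by
  intro c _
  unfold Spec_add_new_categories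
  exact ports_eq c
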